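-- pv_equiv track=rewrite | github.com/philthyharry/gdfplot | tests/helpers.py | two_states_permutator
-- ===== SOURCE A (Python) =====
-- import itertools as itr
--
-- def two_states_permutator(values_list, repeats=None,
--                           alt=None):  # todo: remove as not used
-- 	"""Iterator creating all possible combinations of a list, where each value
-- 	is permutated with two states: value or None. Eg. ['test', 'value'] for 2 repeats
-- 	yields (test, value), (test, None), (None, value) and (None, None)"""
-- 	if repeats and repeats > len(values_list):
-- 		raise ValueError('Parameter repeats cannot exceed nr of values in values_list!')
-- 	if not repeats:
-- 		repeats = len(values_list)
-- 	for combo in itr.product([True, False], repeat=repeats):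
-- 		yield [v if f else alt for v, f in zip(values_list, combo)]
-- ===== SOURCE B (Python) =====
-- def two_states_permutator(values_list, repeats=None,
--                           alt=None):
--     """Same generator without itertools: recursively build all value/alt
--     choices over the first `repeats` values (value chosen before alt)."""
--     if repeats and repeats > len(values_list):
--         raise ValueError('Parameter repeats cannot exceed nr of values in values_list!')
--     if not repeats:
--         repeats = len(values_list)
--
--     def gen(vals):
--         if not vals:
--             return [[]]
--         tails = gen(vals[1:])
--         return [[vals[0]] + t for t in tails] + [[alt] + t for t in tails]
--
--     yield from gen(values_list[:repeats])
-- ===== Notes on version B (the rewrite author's own statement) =====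
-- stated objective: alternative
-- what changed: Replaces the itertools.product loop over boolean combos + zip comprehension with a direct recursive generator over the list prefix that builds each output by choosing value-then-alt at every position.
import Mathlib
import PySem

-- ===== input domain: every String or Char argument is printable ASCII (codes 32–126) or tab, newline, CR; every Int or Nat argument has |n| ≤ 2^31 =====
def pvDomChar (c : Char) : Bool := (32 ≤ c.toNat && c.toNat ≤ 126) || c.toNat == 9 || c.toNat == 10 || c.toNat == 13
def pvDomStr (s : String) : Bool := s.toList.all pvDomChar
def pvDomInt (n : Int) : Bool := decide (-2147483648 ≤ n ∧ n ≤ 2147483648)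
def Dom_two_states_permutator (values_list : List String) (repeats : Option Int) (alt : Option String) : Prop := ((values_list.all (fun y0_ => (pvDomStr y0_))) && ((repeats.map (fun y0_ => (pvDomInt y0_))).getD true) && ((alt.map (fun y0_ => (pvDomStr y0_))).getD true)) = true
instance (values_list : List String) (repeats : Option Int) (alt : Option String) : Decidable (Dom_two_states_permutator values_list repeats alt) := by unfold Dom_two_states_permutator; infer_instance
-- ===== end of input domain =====

-- B replaces itertools.product + zip with a direct recursion over the list prefix (alternative decomposition, same cost).
-- Both versions are generators; the equivalence is about the list of yielded values.

-- ===== PORT A =====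
-- itertools.product([True, False], repeat=n): leftmost position varies slowest, True first.
def pvProductTF : Nat → List (List Bool)
  | 0 => [[]]
  | n + 1 => (pvProductTF n).map (fun c => true :: c) ++ (pvProductTF n).map (fun c => false :: c)

def two_states_permutator (values_list : List String) (repeats : Option Int) (alt : Option String) : List (List (Option String)) :=
  -- the 'repeats > len' guard raises (excluded by Pre_); 'if not repeats: repeats = len'
  let r : Int := match repeats with
    | none => values_list.length
    | some k => if k = 0 then (values_list.length : Int) else k
  -- r.toNat is exact here since Pre_ gives 0 ≤ r (Python raises on negative repeats)
  (pvProductTF r.toNat).map (fun combo =>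
    (values_list.zip combo).map (fun vf => if vf.2 then some vf.1 else alt))

-- ===== PORT B =====
-- gen(vals): [[]] if vals empty, else value-headed results then alt-headed results.
def pvGenB (alt : Option String) : List String → List (List (Option String))
  | [] => [[]]
  | v :: rest =>
    let tails := pvGenB alt rest
    tails.map (fun t => some v :: t) ++ tails.map (fun t => alt :: t)

def two_states_permutator_alt (values_list : List String) (repeats : Option Int) (alt : Option String) : List (List (Option String)) :=
  let r : Int := match repeats with
    | none => values_list.length
    | some k => if k = 0 then (values_list.length : Int) else k
  pvGenB alt (PySem.List.slice values_list none (some r))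

-- ===== PRECONDITION & SPEC =====
-- Pre_ excludes exactly the inputs where A raises ValueError: repeats = some r with r < 0
-- (itertools.product rejects a negative repeat) or r > len(values_list) (the explicit guard).
def Pre_two_states_permutator (values_list : List String) (repeats : Option Int) (alt : Option String) : Prop :=
  match repeats with
  | none => True
  | some r => 0 ≤ r ∧ r ≤ values_list.length

instance (values_list : List String) (repeats : Option Int) (alt : Option String) : Decidable (Pre_two_states_permutator values_list repeats alt) := by
  unfold Pre_two_states_permutator; cases repeats <;> infer_instance

def pvWitness_two_states_permutator : List String × Option Int × Option String := (["a", "b"], some 1, some "X")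

def Spec_two_states_permutator (values_list : List String) (repeats : Option Int) (alt : Option String) (out : List (List (Option String))) : Prop := out = two_states_permutator_alt values_list repeats alt
instance (values_list : List String) (repeats : Option Int) (alt : Option String) (out : List (List (Option String))) : Decidable (Spec_two_states_permutator values_list repeats alt out) := by unfold Spec_two_states_permutator; infer_instance

-- ===== CLAIM (what is proved, stated in full; the proofs are below) =====
def Claim_equal_two_states_permutator : Prop := ∀ (values_list : List String) (repeats : Option Int) (alt : Option String), Dom_two_states_permutator values_list repeats alt → Pre_two_states_permutator values_list repeats alt → Spec_two_states_permutator values_list repeats alt (two_states_permutator values_list repeats alt)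

-- ===== LEMMAS AND PROOFS =====

-- core loop correspondence: mapping zip-with-flags over all boolean combos of length r
-- equals B's recursion on the first r values, whenever r ≤ length.
theorem pvProduct_eq_genB (alt : Option String) :
    ∀ (r : Nat) (vl : List String), r ≤ vl.length →
      (pvProductTF r).map (fun combo => (vl.zip combo).map (fun vf => if vf.2 then some vf.1 else alt))
        = pvGenB alt (vl.take r) := by
  intro r
  induction r with
  | zero => intro vl _; simp [pvProductTF, pvGenB]
  | succ n ih =>
    intro vl h
    cases vl with
    | nil => simp at h
    | cons v vs =>
      simp only [List.length_cons, Nat.succ_le_succ_iff] at h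
      simp only [pvProductTF, List.take_succ_cons, pvGenB, List.map_append, List.map_map,
        ← ih vs h, List.map_map]
      rfl

theorem two_states_permutator_spec : Claim_equal_two_states_permutator := by
  intro vl repeats alt _ hpre
  unfold Spec_two_states_permutator two_states_permutator two_states_permutator_alt
  cases repeats with
  | none =>
    simp only
    rw [PySem.List.slice_to_natCast]
    exact pvProduct_eq_genB alt _ vl (by simp [Int.toNat_natCast])
  | some k =>
    obtain ⟨h0, hle⟩ := hpre
    simp only
    by_cases hk : k = 0
    · subst hk
      simp only [if_pos]
      rw [PySem.List.slice_to_natCast]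
      exact pvProduct_eq_genB alt _ vl (by simp [Int.toNat_natCast])
    · simp only [if_neg hk]
      have hcast : (k : Int) = ((k.toNat : Nat) : Int) := by omega
      rw [hcast, PySem.List.slice_to_natCast]
      exact pvProduct_eq_genB alt k.toNat vl (by omega)
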